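-- pv_equiv track=rewrite | github.com/Goldria/structures-and-algorithms | scr/lab_work_1/string_.py | delete_spaces
-- ===== SOURCE A (Python) =====
-- def find_spaces(text):
--     numbers = []
--     length = len(text) - 1
--     for i in range(length, -1, -1):
--         if text[i] == ".":
--             j = i - 1
--             while text[j] == " ":
--                 if j not in numbers:
--                     numbers.append(j)
--                 j -= 1
--     return numbers
--
-- def delete_spaces(text):
--     count = len(text) - 1
--     numbers = find_spaces(text)
--     while numbers:
--         if count in numbers:
--             text = text[:count] + text[count + 1:]
--             numbers.remove(count)
--         count -= 1
--
--     return text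
-- ===== SOURCE B (Python) =====
-- def delete_spaces(text):
--     out = []
--     flag = False
--     for c in reversed(text):
--         if c == '.':
--             flag = True
--             out.append(c)
--         elif flag and c == ' ':
--             continue
--         else:
--             flag = False
--             out.append(c)
--     return ''.join(reversed(out))
-- ===== Notes on version B (the rewrite author's own statement) =====
-- stated objective: alternative
-- what changed: Replaced the index pipeline (collect the space indices before dots with a linear 'not in' membership list, then repeatedly re-slice the string while counting an index down) by a single right-to-left pass with an in-dot-run flag that skips spaces preceding a dot and joins the kept characters once.
-- intended difference: On texts whose first non-space character is a dot and whose last character is a space, A's inner scan wraps to negative indices and its deletion loop then splices with negative slice bounds, returning a garbled string with duplicated characters, while B returns the text with every space-run immediately preceding a dot removed, which is the intended behaviour. — e.g. on delete_spaces(". "): A returns ".. ", B returns ". "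
import Mathlib
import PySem

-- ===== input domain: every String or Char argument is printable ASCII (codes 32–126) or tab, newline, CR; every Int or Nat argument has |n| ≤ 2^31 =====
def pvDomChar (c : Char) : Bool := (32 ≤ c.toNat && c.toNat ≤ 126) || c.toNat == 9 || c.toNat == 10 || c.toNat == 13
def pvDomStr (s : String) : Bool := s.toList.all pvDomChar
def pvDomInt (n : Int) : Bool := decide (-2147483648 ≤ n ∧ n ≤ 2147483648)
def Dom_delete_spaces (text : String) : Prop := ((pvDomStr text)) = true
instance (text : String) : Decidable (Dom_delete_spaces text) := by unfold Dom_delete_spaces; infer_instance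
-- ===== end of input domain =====

-- B replaces A's index-collect-then-re-slice pipeline by one right-to-left pass with an
-- in-dot-run flag (a different algorithm of similar cost); on texts starting with spaces+'.'
-- and ending in ' ' A's negative-index wraparound garbles the output and B returns the
-- intended value (see D_).

-- ===== PORT A =====
-- inner 'while text[j] == " "' loop of find_spaces (fuel only makes the recursion total;
-- Python's IndexError would be pyGet? = none, where the loop result is returned — unreachable from find_spaces)
def fsInner (l : List Char) (j : Int) (nums : List Int) (fuel : Nat) : List Int :=
  match fuel with
  | 0 => nums
  | fuel + 1 =>
    match PySem.List.pyGet? l j with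
    | some c =>
      if c = ' ' then
        fsInner l (j - 1) (if j ∈ nums then nums else nums ++ [j]) fuel
      else nums
    | none => nums

def find_spaces (l : List Char) : List Int :=
  (PySem.List.pyRange (PySem.List.len l - 1) (-1) (-1)).foldl
    (fun nums i =>
      match PySem.List.pyGet? l i with
      | some c => if c = '.' then fsInner l (i - 1) nums (2 * l.length + 2) else nums
      | none => nums) []

-- the 'while numbers:' deletion loop (fuel only makes the recursion total)
def delLoop (t : List Char) (nums : List Int) (count : Int) (fuel : Nat) : List Char :=
  match fuel with
  | 0 => t
  | fuel + 1 =>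
    if nums = [] then t
    else
      if count ∈ nums then
        delLoop (PySem.List.slice t none (some count) ++ PySem.List.slice t (some (count + 1)) none)
          ((PySem.List.remove? nums count).getD nums) (count - 1) fuel
      else delLoop t nums (count - 1) fuel

def delete_spaces (text : String) : String :=
  let l := text.toList
  String.ofList (delLoop l (find_spaces l) (PySem.List.len l - 1) (2 * l.length + 2))

-- ===== PORT B =====
-- B's loop over reversed(text): accumulator (out, flag); out collects the kept chars
def delete_spaces_alt (text : String) : String :=
  let st := text.toList.reverse.foldl
    (fun (acc : List Char × Bool) c =>
      if c = '.' then (acc.1 ++ [c], true)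
      else if acc.2 && decide (c = ' ') then acc
      else (acc.1 ++ [c], false)) ([], false)
  String.ofList st.1.reverse

-- ===== PRECONDITION & SPEC =====
-- On texts whose first non-space character is a dot and whose last character is a space, A's
-- inner scan wraps to negative indices and its deletion loop splices with negative bounds,
-- returning a garbled string with duplicated characters; B removes the space-runs immediately
-- preceding dots, which is the intended behaviour (see the pinned witness below).
def D_delete_spaces (text : String) : Prop :=
  text.toList.getLast? = some ' ' ∧ (text.toList.dropWhile (· = ' ')).head? = some '.'
instance (text : String) : Decidable (D_delete_spaces text) := by unfold D_delete_spaces; infer_instance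

def Spec_delete_spaces (text : String) (out : String) : Prop := ¬ D_delete_spaces text → out = delete_spaces_alt text
instance (text : String) (out : String) : Decidable (Spec_delete_spaces text out) := by unfold Spec_delete_spaces; infer_instance

def pvDiffWitness_delete_spaces : String := ". "
def pvDiffWitnessOut_delete_spaces : String × String := (".. ", ". ")

-- ===== CLAIM (what is proved, stated in full; the proofs are below) =====
def Claim_unchanged_delete_spaces : Prop := ∀ (text : String), Dom_delete_spaces text → Spec_delete_spaces text (delete_spaces text)
def Claim_changed_delete_spaces : Prop := Dom_delete_spaces (pvDiffWitness_delete_spaces) ∧ D_delete_spaces (pvDiffWitness_delete_spaces) ∧ delete_spaces (pvDiffWitness_delete_spaces) = pvDiffWitnessOut_delete_spaces.1 ∧ delete_spaces_alt (pvDiffWitness_delete_spaces) = pvDiffWitnessOut_delete_spaces.2 ∧ pvDiffWitnessOut_delete_spaces.1 ≠ pvDiffWitnessOut_delete_spaces.2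

-- ===== LEMMAS AND PROOFS =====

-- middle specification: drop a char iff it is a space whose suffix starts with spaces then a dot
def allSp (l : List Char) : Bool := l.all (· = ' ')

def stDot : List Char → Bool
  | [] => false
  | c :: r => if c = '.' then true else if c = ' ' then stDot r else false

def midFF (l : List Char) (flag : Bool) : List Char :=
  match l with
  | [] => []
  | c :: r => if c = ' ' && (stDot r || (flag && allSp r)) then midFF r flag else c :: midFF r flag

-- structural form of B's loop
def bLoop : List Char → Bool → List Char
  | [], _ => []
  | c :: r, flag =>
    if c = '.' then c :: bLoop r true
    else if flag && decide (c = ' ') then bLoop r flag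
    else c :: bLoop r false

-- A's result as an index filter
def keepAux : List Char → Int → List Int → List Char
  | [], _, _ => []
  | c :: r, j, s => if j ∈ s then keepAux r (j + 1) s else c :: keepAux r (j + 1) s

-- ---- stDot / allSp under appending a last character ----
theorem allSp_append (a : List Char) (c : Char) :
    allSp (a ++ [c]) = (allSp a && decide (c = ' ')) := by
  simp [allSp, List.all_append]

theorem stDot_append_dot (a : List Char) :
    stDot (a ++ ['.']) = (stDot a || allSp a) := by
  induction a with
  | nil => simp [stDot, allSp]
  | cons c r ih =>
    by_cases hc : c = '.'
    · subst hc; simp [stDot]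
    · by_cases hs : c = ' '
      · subst hs; simp [stDot, allSp, ih]
      · simp [stDot, allSp, hc, hs]

theorem stDot_append_of_ne (a : List Char) (c : Char) (h : c ≠ '.') :
    stDot (a ++ [c]) = stDot a := by
  induction a with
  | nil => simp [stDot, h]
  | cons c r ih =>
    by_cases hc : c = '.'
    · subst hc; simp [stDot]
    · by_cases hs : c = ' '
      · subst hs; simp [stDot, ih]
      · simp [stDot, hc, hs]

-- ---- midFF under appending a last character ----
theorem midFF_append_dot (a : List Char) (flag : Bool) :
    midFF (a ++ ['.']) flag = midFF a true ++ ['.'] := by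
  induction a with
  | nil => simp [midFF, stDot]
  | cons c r ih =>
    simp only [List.cons_append, midFF, stDot_append_dot, allSp_append]
    by_cases hc : c = ' '
    · subst hc
      by_cases h1 : stDot r
      · simp [h1, ih]
      · by_cases h2 : allSp r
        · simp [h1, h2, ih]
        · simp [h1, h2, ih]
    · simp [hc, ih]

theorem midFF_append_space (a : List Char) (flag : Bool) :
    midFF (a ++ [' ']) flag = midFF a flag ++ (if flag then [] else [' ']) := by
  induction a with
  | nil =>
    cases flag <;> simp [midFF, stDot, allSp]
  | cons c r ih =>
    simp only [List.cons_append, midFF,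
      stDot_append_of_ne r ' ' (by decide), allSp_append]
    by_cases hc : c = ' '
    · subst hc
      by_cases h1 : stDot r
      · simp [h1, ih]
      · by_cases h2 : allSp r
        · cases flag <;> simp [h1, h2, ih]
        · cases flag <;> simp [h1, h2, ih]
    · simp [hc, ih]

theorem midFF_append_other (a : List Char) (c : Char) (flag : Bool) (h1 : c ≠ '.') (h2 : c ≠ ' ') :
    midFF (a ++ [c]) flag = midFF a false ++ [c] := by
  induction a with
  | nil => simp [midFF, h2]
  | cons x r ih =>
    simp only [List.cons_append, midFF,
      stDot_append_of_ne r c h1, allSp_append]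
    by_cases hx : x = ' '
    · subst hx
      by_cases hd : stDot r
      · simp [hd, ih]
      · simp [hd, h2, ih]
    · simp [hx, ih]

-- ---- B side ----
theorem bFoldl_eq_bLoop (r : List Char) (out : List Char) (flag : Bool) :
    (r.foldl (fun (acc : List Char × Bool) c =>
      if c = '.' then (acc.1 ++ [c], true)
      else if acc.2 && decide (c = ' ') then acc
      else (acc.1 ++ [c], false)) (out, flag)).1 = out ++ bLoop r flag := by
  induction r generalizing out flag with
  | nil => simp [bLoop]
  | cons c r ih =>
    rw [List.foldl_cons]
    show (List.foldl _ (if c = '.' then (out ++ [c], true)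
      else if flag && decide (c = ' ') then (out, flag)
      else (out ++ [c], false)) r).1 = _
    split_ifs with h1 h2
    · subst h1; rw [ih]; simp [bLoop]
    · rw [ih]
      have hf : flag = true := by
        cases flag
        · simp at h2
        · rfl
      have hs : c = ' ' := by
        cases h : decide (c = ' ')
        · rw [h, Bool.and_false] at h2; simp at h2
        · exact of_decide_eq_true h
      subst hf; subst hs
      simp [bLoop]
    · rw [ih]
      rw [show bLoop (c :: r) flag = c :: bLoop r false from by
        simp only [bLoop, if_neg h1, if_neg h2]]
      simp

theorem bLoop_reverse (l : List Char) (flag : Bool) :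
    (bLoop l.reverse flag).reverse = midFF l flag := by
  induction l using List.reverseRecOn generalizing flag with
  | nil => simp [bLoop, midFF]
  | append_singleton a c ih =>
    rw [List.reverse_append, List.reverse_singleton, List.singleton_append]
    show (bLoop (c :: a.reverse) flag).reverse = _
    rw [show bLoop (c :: a.reverse) flag = (if c = '.' then c :: bLoop a.reverse true
      else if flag && decide (c = ' ') then bLoop a.reverse flag
      else c :: bLoop a.reverse false) from rfl]
    split_ifs with h1 h2
    · subst h1
      rw [List.reverse_cons, ih, midFF_append_dot]
    · have hf : flag = true := by
        cases flag
        · simp at h2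
        · rfl
      have hs : c = ' ' := by
        cases h : decide (c = ' ')
        · rw [h, Bool.and_false] at h2; simp at h2
        · exact of_decide_eq_true h
      subst hf; subst hs
      rw [ih, midFF_append_space, if_pos rfl, List.append_nil]
    · rw [List.reverse_cons, ih]
      by_cases hs : c = ' '
      · subst hs
        have hf : flag = false := by
          cases flag
          · rfl
          · simp at h2
        subst hf
        rw [midFF_append_space, if_neg (by decide)]
      · rw [midFF_append_other a c flag h1 hs]

-- ---- keepAux ----
theorem keepAux_of_lt (t : List Char) (j : Int) (s : List Int) (h : ∀ x ∈ s, x < j) :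
    keepAux t j s = t := by
  induction t generalizing j with
  | nil => rfl
  | cons c r ih =>
    rw [keepAux, if_neg (fun hm => absurd (h j hm) (lt_irrefl j))]
    rw [ih (j + 1) (fun x hx => lt_trans (h x hx) (by omega))]

theorem keepAux_append (a b : List Char) (j : Int) (s : List Int) :
    keepAux (a ++ b) j s = keepAux a j s ++ keepAux b (j + a.length) s := by
  induction a generalizing j with
  | nil => simp [keepAux]
  | cons c r ih =>
    simp only [List.cons_append, keepAux, List.length_cons, ih]
    have : j + 1 + (r.length : Int) = j + ((r.length : Int) + 1) := by omega
    rw [this]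
    push_cast
    split_ifs <;> rfl

theorem keepAux_congr (t : List Char) (j : Int) (s s' : List Int)
    (h : ∀ k : Nat, k < t.length → ((j + k) ∈ s ↔ (j + k) ∈ s')) :
    keepAux t j s = keepAux t j s' := by
  induction t generalizing j with
  | nil => rfl
  | cons c r ih =>
    have h0 := h 0 (by simp)
    simp only [Nat.cast_zero, add_zero] at h0
    have hr : ∀ k : Nat, k < r.length → ((j + 1 + (k : Int)) ∈ s ↔ (j + 1 + (k : Int)) ∈ s') := by
      intro k hk
      have := h (k + 1) (by simp; omega)
      push_cast at this
      have e : j + ((k : Int) + 1) = j + 1 + (k : Int) := by omega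
      rw [e] at this
      exact this
    simp only [keepAux]
    by_cases hm : j ∈ s
    · rw [if_pos hm, if_pos (h0.mp hm), ih (j + 1) hr]
    · rw [if_neg hm, if_neg (fun hm' => hm (h0.mpr hm')), ih (j + 1) hr]

theorem keepAux_eq_midFF (t : List Char) (j : Int) (s : List Int)
    (h : ∀ k : Nat, k < t.length →
      ((j + (k : Int)) ∈ s ↔ (t[k]? = some ' ' ∧ stDot (t.drop (k + 1)) = true))) :
    keepAux t j s = midFF t false := by
  induction t generalizing j with
  | nil => rfl
  | cons c r ih =>
    have h0 := h 0 (by simp)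
    simp only [Nat.cast_zero, add_zero, List.getElem?_cons_zero, List.drop_succ_cons,
      List.drop_zero, Option.some.injEq] at h0
    have hr : ∀ k : Nat, k < r.length →
        (((j + 1) + (k : Int)) ∈ s ↔ (r[k]? = some ' ' ∧ stDot (r.drop (k + 1)) = true)) := by
      intro k hk
      have := h (k + 1) (by simp; omega)
      push_cast at this
      have e : j + ((k : Int) + 1) = j + 1 + (k : Int) := by omega
      rw [e] at this
      simpa using this
    simp only [keepAux, midFF]
    by_cases hm : j ∈ s
    · obtain ⟨hc, hd⟩ := h0.mp hm
      rw [if_pos hm, if_pos (by simp [hc, hd]), ih (j + 1) hr]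
    · rw [if_neg hm, ih (j + 1) hr]
      have hni : ¬ (c = ' ' && (stDot r || (false && allSp r))) = true := by
        simp only [Bool.false_and, Bool.or_false, Bool.and_eq_true, decide_eq_true_eq]
        rintro ⟨hcc, hdd⟩
        exact hm (h0.mpr ⟨hcc, hdd⟩)
      rw [if_neg hni]

-- ---- delLoop computes the index filter ----
theorem delLoop_eq_keepAux (c : Nat) (t : List Char) (s : List Int) (fuel : Nat)
    (hnd : s.Nodup) (hb : ∀ x ∈ s, 0 ≤ x ∧ x < (c : Int)) (hc : c ≤ t.length)
    (hf : c + 1 ≤ fuel) :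
    delLoop t s ((c : Int) - 1) fuel = keepAux t 0 s := by
  induction c generalizing t s fuel with
  | zero =>
    have hs : s = [] := by
      cases s with
      | nil => rfl
      | cons y ys => exact absurd (hb y (by simp)) (by omega)
    subst hs
    obtain ⟨f, rfl⟩ : ∃ f, fuel = f + 1 := ⟨fuel - 1, by omega⟩
    rw [delLoop, if_pos rfl, keepAux_of_lt t 0 [] (by simp)]
  | succ c ih =>
    obtain ⟨f, rfl⟩ : ∃ f, fuel = f + 1 := ⟨fuel - 1, by omega⟩
    rw [delLoop]
    have hcount : ((c : Int) + 1) - 1 = (c : Int) := by omega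
    push_cast
    rw [hcount]
    by_cases hnil : s = []
    · subst hnil
      rw [if_pos rfl, keepAux_of_lt t 0 [] (by simp)]
    · rw [if_neg hnil]
      by_cases hmem : (c : Int) ∈ s
      · rw [if_pos hmem]
        have hcl : c < t.length := by omega
        have hslice : PySem.List.slice t none (some (c : Int)) ++
            PySem.List.slice t (some ((c : Int) + 1)) none = t.take c ++ t.drop (c + 1) := by
          rw [PySem.List.slice_to_natCast]
          have e1 : (c : Int) + 1 = ((c + 1 : Nat) : Int) := by push_cast; ring
          rw [e1, PySem.List.slice_from_natCast]
        have hrem : (PySem.List.remove? s (c : Int)).getD s = s.erase (c : Int) := by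
          rw [PySem.List.remove?_eq_some_erase s _ hmem]; rfl
        rw [hslice, hrem]
        have hnd' : (s.erase (c : Int)).Nodup := hnd.erase _
        have hb' : ∀ x ∈ s.erase (c : Int), 0 ≤ x ∧ x < (c : Int) := by
          intro x hx
          rw [List.Nodup.mem_erase_iff hnd] at hx
          have := hb x hx.2
          have hne := hx.1
          constructor
          · exact this.1
          · omega
        have hlen : c ≤ (t.take c ++ t.drop (c + 1)).length := by
          simp [List.length_take, List.length_drop]
          omega
        rw [ih (t.take c ++ t.drop (c + 1)) (s.erase (c : Int)) f hnd' hb' hlen (by omega)]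
        -- now relate the two keepAux values
        have hsplit : t = t.take c ++ t[c] :: t.drop (c + 1) := by
          conv_lhs => rw [← List.take_append_drop c t]
          rw [List.drop_eq_getElem_cons hcl]
        have hlt : (t.take c).length = c := by simp; omega
        have hc0 : (0 : Int) + (c : Nat) = (c : Int) := by push_cast; ring
        have key : keepAux t 0 s = keepAux (t.take c ++ t.drop (c + 1)) 0 (s.erase (c : Int)) := by
          conv_lhs => rw [hsplit]
          rw [keepAux_append, keepAux_append, hlt, hc0]
          rw [show keepAux (t[c] :: t.drop (c + 1)) (c : Int) s =
            keepAux (t.drop (c + 1)) ((c : Int) + 1) s from by rw [keepAux, if_pos hmem]]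
          rw [keepAux_of_lt (t.drop (c + 1)) ((c : Int) + 1) s
            (fun x hx => by have := hb x hx; push_cast at this; omega)]
          rw [keepAux_of_lt (t.drop (c + 1)) ((c : Int)) (s.erase (c : Int))
            (fun x hx => by
              rw [List.Nodup.mem_erase_iff hnd] at hx
              have h1 := hb x hx.2
              have h2 := hx.1
              push_cast at h1
              omega)]
          rw [keepAux_congr (t.take c) 0 s (s.erase (c : Int))
            (fun k hk => by
              rw [List.Nodup.mem_erase_iff hnd]
              have hkc : (0 : Int) + (k : Int) ≠ (c : Int) := by
                rw [hlt] at hk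
                omega
              constructor
              · intro hx; exact ⟨hkc, hx⟩
              · intro hx; exact hx.2)]
        rw [← key]
      · rw [if_neg hmem]
        have hb' : ∀ x ∈ s, 0 ≤ x ∧ x < (c : Int) := by
          intro x hx
          have := hb x hx
          have : x ≠ (c : Int) := fun he => hmem (he ▸ hx)
          omega
        exact ih t s f hnd hb' (by omega) (by omega)

-- ---- stDot characterization by indices ----
theorem stDot_iff (b : List Char) :
    stDot b = true ↔ ∃ i : Nat, i < b.length ∧ b[i]? = some '.' ∧ ∀ p : Nat, p < i → b[p]? = some ' ' := by
  induction b with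
  | nil => simp [stDot]
  | cons c r ih =>
    by_cases hc : c = '.'
    · subst hc
      rw [stDot, if_pos rfl]
      constructor
      · intro _
        exact ⟨0, by simp, by simp, fun p hp => absurd hp (by omega)⟩
      · intro _; rfl
    · by_cases hs : c = ' '
      · subst hs
        rw [stDot, if_neg (by decide), if_pos rfl, ih]
        constructor
        · rintro ⟨i, hi, hdot, hsp⟩
          refine ⟨i + 1, by simp only [List.length_cons]; omega,
            by rw [List.getElem?_cons_succ]; exact hdot, ?_⟩
          intro p hp
          cases p with
          | zero => rw [List.getElem?_cons_zero]
          | succ p => rw [List.getElem?_cons_succ]; exact hsp p (by omega)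
        · rintro ⟨i, hi, hdot, hsp⟩
          cases i with
          | zero => rw [List.getElem?_cons_zero] at hdot; simp at hdot
          | succ i =>
            refine ⟨i, by simp only [List.length_cons] at hi; omega,
              by rwa [List.getElem?_cons_succ] at hdot, ?_⟩
            intro p hp
            have := hsp (p + 1) (by omega)
            rwa [List.getElem?_cons_succ] at this
      · rw [stDot, if_neg hc, if_neg hs]
        simp only [Bool.false_eq_true, false_iff]
        rintro ⟨i, hi, hdot, hsp⟩
        cases i with
        | zero => rw [List.getElem?_cons_zero] at hdot; simp at hdot; exact hc hdot
        | succ i =>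
          have := hsp 0 (by omega)
          rw [List.getElem?_cons_zero] at this
          simp at this
          exact hs this

-- ---- fsInner ----
theorem fsInner_mem (m : Nat) (l : List Char) (nums : List Int) (fuel : Nat)
    (hm : (m : Int) ≤ l.length) (hf : m + 1 ≤ fuel)
    (hstop : (¬ ∀ k : Nat, k < m → l[k]? = some ' ') ∨ l.getLast? ≠ some ' ') (x : Int) :
    x ∈ fsInner l ((m : Int) - 1) nums fuel ↔
      x ∈ nums ∨ ∃ k : Nat, x = (k : Int) ∧ k < m ∧ ∀ k' : Nat, k ≤ k' → k' < m → l[k']? = some ' ' := by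
  induction m generalizing nums fuel with
  | zero =>
    obtain ⟨f, rfl⟩ : ∃ f, fuel = f + 1 := ⟨fuel - 1, by omega⟩
    rw [fsInner]
    have hj : ((0 : Nat) : Int) - 1 = -1 := by norm_num
    rw [hj, PySem.List.pyGet?_neg_one]
    cases hg : l.getLast? with
    | none => simp
    | some c =>
      dsimp only
      have hc : c ≠ ' ' := by
        rcases hstop with hst | hst
        · exact absurd (fun k hk => absurd hk (by omega)) hst
        · intro he; subst he; exact hst hg
      rw [if_neg hc]
      simp
  | succ m ih =>
    obtain ⟨f, rfl⟩ : ∃ f, fuel = f + 1 := ⟨fuel - 1, by omega⟩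
    rw [fsInner]
    have hml : m < l.length := by omega
    have hj : ((m + 1 : Nat) : Int) - 1 = ((m : Nat) : Int) := by push_cast; ring
    rw [hj, PySem.List.pyGet?_natCast, List.getElem?_eq_getElem hml]
    dsimp only
    by_cases hc : l[m] = ' '
    · rw [if_pos hc]
      have hstop' : (¬ ∀ k : Nat, k < m → l[k]? = some ' ') ∨ l.getLast? ≠ some ' ' := by
        rcases hstop with hst | hst
        · left
          intro hall
          apply hst
          intro k hk
          by_cases hkm : k = m
          · subst hkm; rw [List.getElem?_eq_getElem hml, hc]
          · exact hall k (by omega)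
        · right; exact hst
      rw [ih _ f (by omega) (by omega) hstop']
      constructor
      · rintro (hn | ⟨k, rfl, hk, hrun⟩)
        · by_cases hm' : ((m : Nat) : Int) ∈ nums
          · rw [if_pos hm'] at hn; exact Or.inl hn
          · rw [if_neg hm'] at hn
            rcases List.mem_append.mp hn with hn | hn
            · exact Or.inl hn
            · right
              refine ⟨m, by simpa using hn, by omega, ?_⟩
              intro k' hk1 hk2
              have : k' = m := by omega
              subst this
              rw [List.getElem?_eq_getElem hml, hc]
        · right
          refine ⟨k, rfl, by omega, ?_⟩
          intro k' hk1 hk2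
          by_cases hkm : k' = m
          · subst hkm; rw [List.getElem?_eq_getElem hml, hc]
          · exact hrun k' hk1 (by omega)
      · rintro (hn | ⟨k, rfl, hk, hrun⟩)
        · left
          by_cases hm' : ((m : Nat) : Int) ∈ nums
          · rw [if_pos hm']; exact hn
          · rw [if_neg hm']; exact List.mem_append.mpr (Or.inl hn)
        · by_cases hkm : k = m
          · subst hkm
            left
            by_cases hm' : ((k : Nat) : Int) ∈ nums
            · rw [if_pos hm']; exact hm'
            · rw [if_neg hm']; simp
          · right
            exact ⟨k, rfl, by omega, fun k' hk1 hk2 => hrun k' hk1 (by omega)⟩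
    · rw [if_neg hc]
      constructor
      · intro hn; exact Or.inl hn
      · rintro (hn | ⟨k, rfl, hk, hrun⟩)
        · exact hn
        · exact absurd (hrun m (by omega) (by omega)) (by rw [List.getElem?_eq_getElem hml]; simpa using hc)

theorem fsInner_nodup (l : List Char) (j : Int) (nums : List Int) (fuel : Nat)
    (h : nums.Nodup) : (fsInner l j nums fuel).Nodup := by
  induction fuel generalizing j nums with
  | zero => exact h
  | succ fuel ih =>
    rw [fsInner]
    cases hg : PySem.List.pyGet? l j with
    | none => exact h
    | some c =>
      dsimp only
      by_cases hc : c = ' '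
      · rw [if_pos hc]
        apply ih
        by_cases hm : j ∈ nums
        · rw [if_pos hm]; exact h
        · rw [if_neg hm]
          refine List.Nodup.append h (List.nodup_singleton j) ?_
          intro a ha hb
          rw [List.mem_singleton] at hb
          exact hm (hb ▸ ha)
      · rw [if_neg hc]; exact h

-- ---- the outer fold of find_spaces, generalized over the list of Nat indices ----
theorem fsFold_mem (l : List Char) (ms : List Nat) (nums : List Int)
    (hms : ∀ m ∈ ms, m < l.length)
    (hD : ∀ i : Nat, i < l.length → l[i]? = some '.' → (∀ k : Nat, k < i → l[k]? = some ' ') →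
          l.getLast? ≠ some ' ') (x : Int) :
    x ∈ ms.foldl (fun nums m =>
      match PySem.List.pyGet? l ((m : Nat) : Int) with
      | some c => if c = '.' then fsInner l (((m : Nat) : Int) - 1) nums (2 * l.length + 2) else nums
      | none => nums) nums ↔
    x ∈ nums ∨ ∃ mi ∈ ms, l[mi]? = some '.' ∧
      ∃ k : Nat, x = (k : Int) ∧ k < mi ∧ ∀ k' : Nat, k ≤ k' → k' < mi → l[k']? = some ' ' := by
  induction ms generalizing nums with
  | nil => simp
  | cons m ms ih =>
    rw [List.foldl_cons]
    have hml : m < l.length := hms m (by simp)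
    rw [PySem.List.pyGet?_natCast, List.getElem?_eq_getElem hml]
    dsimp only
    have hms' : ∀ m' ∈ ms, m' < l.length := fun m' hm' => hms m' (by simp [hm'])
    by_cases hdot : l[m] = '.'
    · rw [if_pos hdot]
      rw [ih _ hms']
      have hstop : (¬ ∀ k : Nat, k < m → l[k]? = some ' ') ∨ l.getLast? ≠ some ' ' := by
        by_cases hall : ∀ k : Nat, k < m → l[k]? = some ' '
        · exact Or.inr (hD m hml (by rw [List.getElem?_eq_getElem hml, hdot]) hall)
        · exact Or.inl hall
      rw [fsInner_mem m l nums (2 * l.length + 2) (by omega) (by omega) hstop x]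
      constructor
      · rintro ((hn | ⟨k, rfl, hk, hrun⟩) | ⟨mi, hmi, hmidot, hex⟩)
        · exact Or.inl hn
        · exact Or.inr ⟨m, by simp, by rw [List.getElem?_eq_getElem hml, hdot], k, rfl, hk, hrun⟩
        · exact Or.inr ⟨mi, by simp [hmi], hmidot, hex⟩
      · rintro (hn | ⟨mi, hmi, hmidot, hex⟩)
        · exact Or.inl (Or.inl hn)
        · rcases List.mem_cons.mp hmi with rfl | hmi'
          · exact Or.inl (Or.inr hex)
          · exact Or.inr ⟨mi, hmi', hmidot, hex⟩
    · rw [if_neg hdot]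
      rw [ih _ hms']
      constructor
      · rintro (hn | ⟨mi, hmi, hmidot, hex⟩)
        · exact Or.inl hn
        · exact Or.inr ⟨mi, by simp [hmi], hmidot, hex⟩
      · rintro (hn | ⟨mi, hmi, hmidot, hex⟩)
        · exact Or.inl hn
        · rcases List.mem_cons.mp hmi with rfl | hmi'
          · rw [List.getElem?_eq_getElem hml] at hmidot
            simp only [Option.some.injEq] at hmidot
            exact absurd hmidot hdot
          · exact Or.inr ⟨mi, hmi', hmidot, hex⟩

theorem fsFoldInt_nodup (l : List Char) (is : List Int) (nums : List Int) (h : nums.Nodup) :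
    (is.foldl (fun nums i =>
      match PySem.List.pyGet? l i with
      | some c => if c = '.' then fsInner l (i - 1) nums (2 * l.length + 2) else nums
      | none => nums) nums).Nodup := by
  induction is generalizing nums with
  | nil => exact h
  | cons i is ih =>
    rw [List.foldl_cons]
    apply ih
    cases PySem.List.pyGet? l i with
    | none => exact h
    | some c =>
      dsimp only
      by_cases hc : c = '.'
      · rw [if_pos hc]; exact fsInner_nodup l (i - 1) nums _ h
      · rw [if_neg hc]; exact h

theorem find_spaces_nodup (l : List Char) : (find_spaces l).Nodup := by
  unfold find_spaces
  exact fsFoldInt_nodup l _ [] List.nodup_nil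

-- the index list of find_spaces' outer loop, as Nat indices
theorem pyRange_down (l : List Char) :
    PySem.List.pyRange (PySem.List.len l - 1) (-1) (-1) =
      ((List.range l.length).map (fun k => l.length - 1 - k)).map (fun m => ((m : Nat) : Int)) := by
  rw [PySem.List.pyRange_neg_one, PySem.List.len_eq]
  have he : ((l.length : Int) - 1 - (-1)).toNat = l.length := by omega
  rw [he, List.map_map]
  apply List.map_congr_left
  intro k hk
  rw [List.mem_range] at hk
  simp only [Function.comp_apply]
  push_cast [Nat.cast_sub (by omega : 1 + k ≤ l.length)]
  omega

theorem mem_down_iff (n mi : Nat) :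
    mi ∈ (List.range n).map (fun k => n - 1 - k) ↔ mi < n := by
  simp only [List.mem_map, List.mem_range]
  constructor
  · rintro ⟨k, hk, rfl⟩; omega
  · intro h; exact ⟨n - 1 - mi, by omega, by omega⟩

-- dot with all-space prefix forces dropWhile-head '.'
theorem dropWhile_head_dot (l : List Char) (i : Nat) (hi : i < l.length)
    (hdot : l[i]? = some '.') (hsp : ∀ k : Nat, k < i → l[k]? = some ' ') :
    (l.dropWhile (· = ' ')).head? = some '.' := by
  induction l generalizing i with
  | nil => simp at hi
  | cons c r ih =>
    cases i with
    | zero =>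
      rw [List.getElem?_cons_zero] at hdot
      simp only [Option.some.injEq] at hdot
      subst hdot
      rw [List.dropWhile_cons]
      simp
    | succ i =>
      have hc : c = ' ' := by
        have := hsp 0 (by omega)
        rw [List.getElem?_cons_zero] at this
        simpa using this
      subst hc
      rw [List.dropWhile_cons]
      rw [if_pos (by simp)]
      exact ih i (by simpa using hi) (by rwa [List.getElem?_cons_succ] at hdot)
        (fun k hk => by
          have := hsp (k + 1) (by omega)
          rwa [List.getElem?_cons_succ] at this)

theorem find_spaces_mem (l : List Char)
    (hD : ¬ (l.getLast? = some ' ' ∧ (l.dropWhile (· = ' ')).head? = some '.')) (x : Int) :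
    x ∈ find_spaces l ↔
      ∃ mi : Nat, mi < l.length ∧ l[mi]? = some '.' ∧
        ∃ k : Nat, x = (k : Int) ∧ k < mi ∧ ∀ k' : Nat, k ≤ k' → k' < mi → l[k']? = some ' ' := by
  have hD' : ∀ i : Nat, i < l.length → l[i]? = some '.' →
      (∀ k : Nat, k < i → l[k]? = some ' ') → l.getLast? ≠ some ' ' := by
    intro i hi hdot hsp hlast
    exact hD ⟨hlast, dropWhile_head_dot l i hi hdot hsp⟩
  unfold find_spaces
  rw [pyRange_down, List.foldl_map]
  rw [fsFold_mem l _ [] (fun m hm => by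
      rw [mem_down_iff] at hm
      exact hm) hD' x]
  simp only [List.not_mem_nil, false_or]
  constructor
  · rintro ⟨mi, hmi, hdot, hex⟩
    exact ⟨mi, (mem_down_iff l.length mi).mp hmi, hdot, hex⟩
  · rintro ⟨mi, hmi, hdot, hex⟩
    exact ⟨mi, (mem_down_iff l.length mi).mpr hmi, hdot, hex⟩

-- ===== VERDICT (by name: the statement is the Claim_ definition above) =====
theorem S_char (l : List Char)
    (hD : ¬ (l.getLast? = some ' ' ∧ (l.dropWhile (· = ' ')).head? = some '.')) (k : Nat)
    (hk : k < l.length) :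
    ((0 : Int) + (k : Int)) ∈ find_spaces l ↔
      (l[k]? = some ' ' ∧ stDot (l.drop (k + 1)) = true) := by
  rw [zero_add, find_spaces_mem l hD]
  constructor
  · rintro ⟨mi, hmi, hdot, k0, hkk, hk0, hrun⟩
    have hkeq : k0 = k := by exact_mod_cast hkk.symm
    subst hkeq
    refine ⟨hrun k0 (by omega) (by omega), ?_⟩
    rw [stDot_iff]
    refine ⟨mi - (k0 + 1), by simp only [List.length_drop]; omega, ?_, ?_⟩
    · rw [List.getElem?_drop]
      rw [show k0 + 1 + (mi - (k0 + 1)) = mi from by omega]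
      exact hdot
    · intro p hp
      rw [List.getElem?_drop]
      exact hrun (k0 + 1 + p) (by omega) (by omega)
  · rintro ⟨hsp, hstd⟩
    rw [stDot_iff] at hstd
    obtain ⟨i, hi, hdot, hpre⟩ := hstd
    rw [List.length_drop] at hi
    rw [List.getElem?_drop] at hdot
    refine ⟨k + 1 + i, by omega, hdot, k, rfl, by omega, ?_⟩
    intro k' h1 h2
    by_cases hke : k' = k
    · subst hke; exact hsp
    · have := hpre (k' - (k + 1)) (by omega)
      rw [List.getElem?_drop] at this
      rw [show k + 1 + (k' - (k + 1)) = k' from by omega] at this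
      exact this

theorem delete_spaces_spec : Claim_unchanged_delete_spaces := by
  intro text _ hD
  unfold D_delete_spaces at hD
  show delete_spaces text = delete_spaces_alt text
  simp only [delete_spaces, delete_spaces_alt]
  have hb : ∀ x ∈ find_spaces text.toList, 0 ≤ x ∧ x < ((text.toList.length : Nat) : Int) := by
    intro x hx
    rw [find_spaces_mem _ hD] at hx
    obtain ⟨mi, hmi, _, k, rfl, hk, _⟩ := hx
    constructor
    · exact_mod_cast Nat.zero_le k
    · exact_mod_cast by omega
  have h1 : delLoop text.toList (find_spaces text.toList)
      (PySem.List.len text.toList - 1) (2 * text.toList.length + 2) =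
      keepAux text.toList 0 (find_spaces text.toList) := by
    rw [PySem.List.len_eq]
    exact delLoop_eq_keepAux text.toList.length text.toList (find_spaces text.toList)
      (2 * text.toList.length + 2) (find_spaces_nodup text.toList) hb (le_refl _) (by omega)
  have h2 : keepAux text.toList 0 (find_spaces text.toList) = midFF text.toList false :=
    keepAux_eq_midFF text.toList 0 (find_spaces text.toList)
      (fun k hk => S_char text.toList hD k hk)
  have h3 := bFoldl_eq_bLoop text.toList.reverse [] false
  rw [h1, h2, h3, List.nil_append, bLoop_reverse]

theorem delete_spaces_changed : Claim_changed_delete_spaces := by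
  unfold Claim_changed_delete_spaces; decide
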